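-- pv_equiv track=rewrite | github.com/GiuseppeNappo/MagicPotBackend | CreateQuery.py | createQuery
-- ===== SOURCE A (Python) =====
-- def createQuery(userTerms, terms):
--     query = [0] * len(terms)
--     for x in userTerms:
--         i = 0
--         for y in terms:
--             if x == y:
--                 query[i] = 1
--             i = i + 1
--
--     return query
-- ===== SOURCE B (Python) =====
-- def createQuery(userTerms, terms):
--     present = set(userTerms)
--     return [1 if t in present else 0 for t in terms]
-- ===== Notes on version B (the rewrite author's own statement) =====
-- stated objective: faster
-- what changed: replaced the nested scan (for each user term, scan all terms and set matching indices) by a set of userTerms built once and a single pass over terms testing membership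
import Mathlib
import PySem

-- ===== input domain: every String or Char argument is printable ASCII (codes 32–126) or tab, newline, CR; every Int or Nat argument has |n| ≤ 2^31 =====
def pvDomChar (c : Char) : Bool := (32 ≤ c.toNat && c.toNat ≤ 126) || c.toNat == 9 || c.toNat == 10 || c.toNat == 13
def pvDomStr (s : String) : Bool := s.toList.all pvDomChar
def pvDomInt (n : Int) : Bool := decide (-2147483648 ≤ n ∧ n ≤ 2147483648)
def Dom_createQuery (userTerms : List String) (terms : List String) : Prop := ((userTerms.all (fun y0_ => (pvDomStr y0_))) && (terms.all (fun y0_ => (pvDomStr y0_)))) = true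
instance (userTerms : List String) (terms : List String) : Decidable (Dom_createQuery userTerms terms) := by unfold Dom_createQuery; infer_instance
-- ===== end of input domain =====

-- B builds a set of userTerms once and marks each term by membership in one pass (asymptotically faster than A's nested scan).

-- ===== PORT A =====
def createQuery (userTerms : List String) (terms : List String) : List Int :=
  let query := List.replicate terms.length (0 : Int)
  userTerms.foldl (fun query x =>
    (terms.foldl (fun (st : List Int × Int) y =>
      ((if x == y then PySem.List.pySetD st.1 st.2 1 else st.1), st.2 + 1))
      (query, (0 : Int))).1) query

-- ===== PORT B =====
def createQuery_alt (userTerms : List String) (terms : List String) : List Int :=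
  let present := PySem.Set.ofList userTerms
  terms.map (fun t => if PySem.Set.contains present t then 1 else 0)

-- ===== PRECONDITION & SPEC =====
def Spec_createQuery (userTerms : List String) (terms : List String) (out : List Int) : Prop := out = createQuery_alt userTerms terms
instance (userTerms : List String) (terms : List String) (out : List Int) : Decidable (Spec_createQuery userTerms terms out) := by unfold Spec_createQuery; infer_instance

-- ===== CLAIM (what is proved, stated in full; the proofs are below) =====
def Claim_equal_createQuery : Prop := ∀ (userTerms : List String) (terms : List String), Dom_createQuery userTerms terms → Spec_createQuery userTerms terms (createQuery userTerms terms)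

-- ===== LEMMAS AND PROOFS =====

-- pointwise effect of A's inner loop for a single user term x
def upd (x : String) : List String → List Int → List Int
  | [], l => l
  | _ :: _, [] => []
  | y :: ys, v :: vs => (if x = y then 1 else v) :: upd x ys vs

-- pointwise effect of A's whole outer loop
def updM (us : List String) : List String → List Int → List Int
  | [], l => l
  | _ :: _, [] => []
  | y :: ys, v :: vs => (if y ∈ us then 1 else v) :: updM us ys vs

theorem upd_length (x : String) : ∀ (ts : List String) (q : List Int), (upd x ts q).length = q.length
  | [], _ => rfl
  | _ :: _, [] => rfl
  | y :: ys, v :: vs => by simp [upd, upd_length x ys vs]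

theorem inner_eq (x : String) : ∀ (ts : List String) (q : List Int) (n : Nat),
    n + ts.length ≤ q.length →
    (ts.foldl (fun (st : List Int × Int) y =>
      ((if x == y then PySem.List.pySetD st.1 st.2 1 else st.1), st.2 + 1))
      (q, (n : Int))).1 = q.take n ++ upd x ts (q.drop n)
  | [], q, n, _ => by simp [upd]
  | y :: ys, q, n, h => by
    have hn : n < q.length := by simp at h; omega
    have hdrop : q.drop n = q[n] :: q.drop (n + 1) := (List.drop_eq_getElem_cons hn)
    have hcast : (n : Int) + 1 = ((n + 1 : Nat) : Int) := by push_cast; ring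
    simp only [List.foldl_cons, hcast]
    by_cases hxy : x = y
    · have hset : PySem.List.pySetD q (n : Int) (1 : Int) = q.set n 1 := by
        simp [PySem.List.pySetD_natCast]
      have hlen : (q.set n 1).length = q.length := by simp
      rw [if_pos (by simp [hxy]), hset,
          inner_eq x ys (q.set n 1) (n + 1) (by rw [hlen]; simp at h ⊢; omega)]
      rw [hdrop]
      simp only [upd, if_pos hxy]
      have hq : q.set n 1 = q.take n ++ 1 :: q.drop (n + 1) := by
        rw [List.set_eq_take_append_cons_drop, if_pos hn]
      have hlt : (q.take n).length = n := by simp; omega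
      rw [hq, List.take_append, List.drop_append, hlt]
      simp [List.take_take, Nat.min_eq_left hn.le, List.drop_eq_nil_of_le]
    · rw [if_neg (by simp [hxy]), inner_eq x ys q (n + 1) (by simp at h ⊢; omega)]
      rw [hdrop]
      simp only [upd, if_neg hxy]
      have htk : q.take (n + 1) = q.take n ++ [q[n]] := by
        rw [List.take_add_one, List.getElem?_eq_getElem hn]; rfl
      rw [htk, List.append_assoc]
      rfl

theorem updM_nil : ∀ (ts : List String) (q : List Int), q.length = ts.length → updM [] ts q = q
  | [], [], _ => rfl
  | [], _ :: _, h => by simp at h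
  | _ :: _, [], h => by simp at h
  | y :: ys, v :: vs, h => by
    simp [updM, updM_nil ys vs (by simpa using h)]

theorem updM_upd (x : String) (us : List String) : ∀ (ts : List String) (q : List Int),
    updM us ts (upd x ts q) = updM (x :: us) ts q
  | [], _ => rfl
  | _ :: _, [] => rfl
  | y :: ys, v :: vs => by
    simp only [upd, updM, updM_upd x us ys vs, List.mem_cons]
    congr 1
    by_cases h1 : y ∈ us <;> by_cases h2 : x = y <;> simp [h1, h2]
    exact fun hh => absurd hh.symm h2

theorem outer_eq (ts : List String) : ∀ (us : List String) (q : List Int), q.length = ts.length →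
    us.foldl (fun q x =>
      (ts.foldl (fun (st : List Int × Int) y =>
        ((if x == y then PySem.List.pySetD st.1 st.2 1 else st.1), st.2 + 1))
        (q, (0 : Int))).1) q = updM us ts q
  | [], q, h => by simpa using (updM_nil ts q h).symm
  | x :: us, q, h => by
    have h0 : (0 : Nat) + ts.length ≤ q.length := by omega
    have := inner_eq x ts q 0 h0
    simp only [Nat.cast_zero] at this
    simp only [List.foldl_cons, this, List.take_zero, List.drop_zero, List.nil_append]
    rw [outer_eq ts us (upd x ts q) (by rw [upd_length]; exact h)]
    exact updM_upd x us ts q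

theorem updM_replicate (us : List String) : ∀ (ts : List String),
    updM us ts (List.replicate ts.length 0) =
      ts.map (fun t => if PySem.Set.contains (PySem.Set.ofList us) t then 1 else 0)
  | [] => rfl
  | y :: ys => by
    simp only [List.length_cons, List.replicate_succ, updM, List.map_cons, updM_replicate us ys]
    congr 1
    by_cases h : y ∈ us
    · simp [PySem.Set.contains, h]
    · simp [PySem.Set.contains, h]


-- ===== VERDICT (by name: the statement is the Claim_ definition above) =====
theorem createQuery_spec : Claim_equal_createQuery := by
  intro us ts _
  unfold Spec_createQuery createQuery createQuery_alt
  simp only []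
  rw [outer_eq ts us _ (by simp)]
  exact updM_replicate us ts
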